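-- pv_equiv track=rewrite | github.com/bpantea/leetcode | src/problems/BestTimeToBuyAndSellStock3.py | maxProfitk
-- ===== SOURCE A (Python) =====
-- from typing import List
--
-- def maxProfitk(k: int, prices: List[int]) -> int:
--     d = [[None] * k, [None] * k]
--     for price in prices:
--         for j in reversed(range(1, k)):
--             if d[0][j] is not None:
--                 if d[1][j] is None or d[0][j] + price > d[1][j]:
--                     d[1][j] = d[0][j] + price
--             if d[1][j - 1] is not None:
--                 if d[0][j] is None or d[1][j - 1] - price > d[0][j]:
--                     d[0][j] = d[1][j - 1] - price
--         if d[0][0] is not None: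
--             if d[1][0] is None or d[0][0] + price > d[1][0]:
--                 d[1][0] = d[0][0] + price
--         if d[0][0] is None or -price > d[0][0]:
--             d[0][0] = -price
--
--     best = 0
--     for i in range(k):
--         if d[1][i] is not None and d[1][i] > best:
--             best = d[1][i]
--     return best
-- ===== SOURCE B (Python) =====
-- from typing import List
--
--
-- def maxProfitk(k: int, prices: List[int]) -> int:
--     # Transaction-major staged passes: stage j sweeps the whole price list once,
--     # carrying scalar (buy, sell) and recording the per-prefix sell values that
--     # the next stage reads; A instead sweeps prices once, updating a k-wide
--     # table per price.  Order of the two loops is interchanged; the values match.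
--     if k <= 0 or not prices:
--         return 0
--     prev = [0] * (len(prices) + 1)  # stage "-1": zero profit with no transaction
--     best = 0
--     for _ in range(k):
--         b = s = None
--         cur = [None]
--         for p, q in zip(prices, prev):
--             if b is not None and (s is None or b + p > s):
--                 s = b + p
--             if q is not None and (b is None or q - p > b):
--                 b = q - p
--             cur.append(s)
--         if s is not None and s > best:
--             best = s
--         prev = cur
--     return best
-- ===== Notes on version B (the rewrite author's own statement) =====
-- stated objective: alternative
-- what changed: B interchanges the loops: instead of A's single sweep over prices updating a k-wide buy/sell table per price, B runs k transaction stages, each a single scalar-state sweep over all prices that records the per-prefix best-sell list consumed by the next stage; the answer is the running max of the stage-final sells.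
import Mathlib
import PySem

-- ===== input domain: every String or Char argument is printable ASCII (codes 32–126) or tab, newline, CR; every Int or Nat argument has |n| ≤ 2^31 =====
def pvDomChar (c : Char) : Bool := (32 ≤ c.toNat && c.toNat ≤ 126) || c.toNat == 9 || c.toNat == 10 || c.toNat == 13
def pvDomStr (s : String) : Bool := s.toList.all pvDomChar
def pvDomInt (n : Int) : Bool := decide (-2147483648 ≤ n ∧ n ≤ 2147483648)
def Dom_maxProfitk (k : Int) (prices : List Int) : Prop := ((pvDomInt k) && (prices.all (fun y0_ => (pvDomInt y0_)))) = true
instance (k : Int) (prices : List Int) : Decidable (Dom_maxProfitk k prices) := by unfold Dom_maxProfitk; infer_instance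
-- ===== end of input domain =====

-- B interchanges the two loops: k transaction-major stages, each one scalar-state sweep over the
-- prices recording the per-prefix sell list the next stage reads, instead of A's single price sweep
-- updating a k-wide table; same O(n·k) cost, proved to visit the same DP values in the other order.


-- ===== PORT A =====
-- Python list indexing/assignment d[i] = …, d[i]; exact for the indices A uses (all nonnegative
-- and in range: j ∈ [1,k), j-1, 0, and i ∈ [0,k)); an Array so each access is O(1) as in Python.
def aget (a : Array (Option Int)) (i : Int) : Option Int := a.getD i.toNat none

def aset (a : Array (Option Int)) (i : Int) (v : Option Int) : Array (Option Int) :=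
  a.setIfInBounds i.toNat v

-- body of A's inner 'for j in reversed(range(1, k))' loop; d = (st.1, st.2) = (d[0], d[1])
def stepJ (price : Int) (st : Array (Option Int) × Array (Option Int)) (j : Int) :
    Array (Option Int) × Array (Option Int) :=
  let d0 := st.1
  let d1 := st.2
  let d1' :=
    match aget d0 j with
    | some v =>
      match aget d1 j with
      | none => aset d1 j (some (v + price))
      | some w => if v + price > w then aset d1 j (some (v + price)) else d1
    | none => d1
  let d0' :=
    match aget d1' (j - 1) with
    | some v =>
      match aget d0 j with
      | none => aset d0 j (some (v - price))
      | some w => if v - price > w then aset d0 j (some (v - price)) else d0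
    | none => d0
  (d0', d1')

-- body of A's outer 'for price in prices' loop (inner loop, then the j = 0 updates)
def stepPrice (k price : Int) (st : Array (Option Int) × Array (Option Int)) :
    Array (Option Int) × Array (Option Int) :=
  let st1 := ((PySem.List.pyRange 1 k 1).reverse).foldl (stepJ price) st
  let d0 := st1.1
  let d1 := st1.2
  let d1' :=
    match aget d0 0 with
    | some v =>
      match aget d1 0 with
      | none => aset d1 0 (some (v + price))
      | some w => if v + price > w then aset d1 0 (some (v + price)) else d1
    | none => d1
  let d0' :=
    match aget d0 0 with
    | none => aset d0 0 (some (-price))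
    | some w => if -price > w then aset d0 0 (some (-price)) else d0
  (d0', d1')

def maxProfitk (k : Int) (prices : List Int) : Int :=
  let st := prices.foldl (fun st price => stepPrice k price st)
    (Array.replicate k.toNat (none : Option Int), Array.replicate k.toNat (none : Option Int))
  (PySem.List.pyRange 0 k 1).foldl (fun best i =>
    match aget st.2 i with
    | some v => if v > best then v else best
    | none => best) 0

-- ===== PORT B =====
-- body of B's inner 'for p, q in zip(prices, prev)' loop; st = (b, s, cur)
def passStep (st : Option Int × Option Int × List (Option Int)) (pq : Int × Option Int) :
    Option Int × Option Int × List (Option Int) :=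
  let p := pq.1
  let q := pq.2
  let b := st.1
  let s := st.2.1
  let cur := st.2.2
  let s' :=
    match b with
    | some bv =>
      match s with
      | none => some (bv + p)
      | some sv => if bv + p > sv then some (bv + p) else s
    | none => s
  let b' :=
    match q with
    | some qv =>
      match b with
      | none => some (qv - p)
      | some bv => if qv - p > bv then some (qv - p) else b
    | none => b
  (b', s', cur ++ [s'])

-- body of B's outer 'for _ in range(k)' loop: one full stage sweep; st = (best, prev)
def stageStep (prices : List Int) (st : Int × List (Option Int)) : Int × List (Option Int) :=
  let r := (prices.zip st.2).foldl passStep (none, none, [none])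
  (match r.2.1 with
   | some sv => if sv > st.1 then sv else st.1
   | none => st.1,
   r.2.2)

def maxProfitk_alt (k : Int) (prices : List Int) : Int :=
  if k ≤ 0 ∨ prices = [] then 0
  else
    ((PySem.List.pyRange 0 k 1).foldl (fun st _ => stageStep prices st)
      (0, List.replicate (prices.length + 1) (some 0 : Option Int))).1

-- ===== PRECONDITION & SPEC =====
-- Pre_ excludes only k ≤ 0 with a nonempty price list, where A raises IndexError (d[0][0] on an empty row).
def Pre_maxProfitk (k : Int) (prices : List Int) : Prop := 1 ≤ k ∨ prices = []
instance (k : Int) (prices : List Int) : Decidable (Pre_maxProfitk k prices) := by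
  unfold Pre_maxProfitk; infer_instance

def pvWitness_maxProfitk : Int × List Int := (2, [3, 1, 4, 1, 5])

def Spec_maxProfitk (k : Int) (prices : List Int) (out : Int) : Prop := out = maxProfitk_alt k prices
instance (k : Int) (prices : List Int) (out : Int) : Decidable (Spec_maxProfitk k prices out) := by
  unfold Spec_maxProfitk; infer_instance

-- ===== CLAIM (what is proved, stated in full; the proofs are below) =====
def Claim_equal_maxProfitk : Prop := ∀ (k : Int) (prices : List Int), Dom_maxProfitk k prices → Pre_maxProfitk k prices → Spec_maxProfitk k prices (maxProfitk k prices)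

-- ===== LEMMAS AND PROOFS =====

-- list-level mirror of port A (proof artifact: the Array port is simulated by these)
-- body of A's inner 'for j in reversed(range(1, k))' loop; d = (st.1, st.2) = (d[0], d[1])
def stepJL (price : Int) (st : List (Option Int) × List (Option Int)) (j : Int) :
    List (Option Int) × List (Option Int) :=
  let d0 := st.1
  let d1 := st.2
  let d1' :=
    match PySem.List.pyGetD d0 j none with
    | some v =>
      match PySem.List.pyGetD d1 j none with
      | none => PySem.List.pySetD d1 j (some (v + price))
      | some w => if v + price > w then PySem.List.pySetD d1 j (some (v + price)) else d1
    | none => d1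
  let d0' :=
    match PySem.List.pyGetD d1' (j - 1) none with
    | some v =>
      match PySem.List.pyGetD d0 j none with
      | none => PySem.List.pySetD d0 j (some (v - price))
      | some w => if v - price > w then PySem.List.pySetD d0 j (some (v - price)) else d0
    | none => d0
  (d0', d1')

-- body of A's outer 'for price in prices' loop (inner loop, then the j = 0 updates)
def stepPriceL (k price : Int) (st : List (Option Int) × List (Option Int)) :
    List (Option Int) × List (Option Int) :=
  let st1 := ((PySem.List.pyRange 1 k 1).reverse).foldl (stepJL price) st
  let d0 := st1.1
  let d1 := st1.2
  let d1' :=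
    match PySem.List.pyGetD d0 0 none with
    | some v =>
      match PySem.List.pyGetD d1 0 none with
      | none => PySem.List.pySetD d1 0 (some (v + price))
      | some w => if v + price > w then PySem.List.pySetD d1 0 (some (v + price)) else d1
    | none => d1
  let d0' :=
    match PySem.List.pyGetD d0 0 none with
    | none => PySem.List.pySetD d0 0 (some (-price))
    | some w => if -price > w then PySem.List.pySetD d0 0 (some (-price)) else d0
  (d0', d1')

def maxProfitkL (k : Int) (prices : List Int) : Int :=
  let st := prices.foldl (fun st price => stepPriceL k price st)
    (List.replicate k.toNat (none : Option Int), List.replicate k.toNat (none : Option Int))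
  (PySem.List.pyRange 0 k 1).foldl (fun best i =>
    match PySem.List.pyGetD st.2 i none with
    | some v => if v > best then v else best
    | none => best) 0



-- ===== Array/List simulation: the Array port computes the list-level mirror =====
theorem aget_eq (a : Array (Option Int)) (i : Int) (h : 0 ≤ i) :
    aget a i = PySem.List.pyGetD a.toList i none := by
  unfold aget
  rw [show PySem.List.pyGetD a.toList i none = a.toList.getD i.toNat none from by
    have hh : i = ((i.toNat : Nat) : Int) := by omega
    rw [hh, PySem.List.pyGetD_natCast, List.getD_eq_getElem?_getD,
      show (((i.toNat : Nat) : Int)).toNat = i.toNat from by omega, List.getD_eq_getElem?_getD]]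
  by_cases hlt : i.toNat < a.size
  · simp [Array.getD, hlt, Array.getElem_toList]
  · simp [Array.getD, hlt]

theorem aset_eq (a : Array (Option Int)) (i : Int) (v : Option Int) (h : 0 ≤ i) :
    (aset a i v).toList = PySem.List.pySetD a.toList i v := by
  unfold aset
  rw [PySem.List.pySetD_of_nonneg _ _ h, Array.toList_setIfInBounds]

theorem stepJ_sim (price : Int) (st : Array (Option Int) × Array (Option Int)) (j : Int)
    (hj : 1 ≤ j) :
    ((stepJ price st j).1.toList, (stepJ price st j).2.toList)
      = stepJL price (st.1.toList, st.2.toList) j := by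
  unfold stepJ stepJL
  dsimp only
  rw [aget_eq st.1 j (by omega), aget_eq st.2 j (by omega)]
  have hd1 : (match PySem.List.pyGetD st.1.toList j none with
      | some v =>
        match PySem.List.pyGetD st.2.toList j none with
        | none => aset st.2 j (some (v + price))
        | some w => if v + price > w then aset st.2 j (some (v + price)) else st.2
      | none => st.2).toList
      = (match PySem.List.pyGetD st.1.toList j none with
      | some v =>
        match PySem.List.pyGetD st.2.toList j none with
        | none => PySem.List.pySetD st.2.toList j (some (v + price))
        | some w => if v + price > w then PySem.List.pySetD st.2.toList j (some (v + price))
                    else st.2.toList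
      | none => st.2.toList) := by
    cases PySem.List.pyGetD st.1.toList j none with
    | none => rfl
    | some v =>
      cases PySem.List.pyGetD st.2.toList j none with
      | none => exact aset_eq st.2 j _ (by omega)
      | some w =>
        dsimp only
        split_ifs
        · exact aset_eq st.2 j _ (by omega)
        · rfl
  rw [Prod.mk.injEq]
  refine ⟨?_, hd1⟩
  rw [aget_eq _ (j - 1) (by omega), hd1]
  cases PySem.List.pyGetD
      (match PySem.List.pyGetD st.1.toList j none with
      | some v =>
        match PySem.List.pyGetD st.2.toList j none with
        | none => PySem.List.pySetD st.2.toList j (some (v + price))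
        | some w => if v + price > w then PySem.List.pySetD st.2.toList j (some (v + price))
                    else st.2.toList
      | none => st.2.toList) (j - 1) none with
  | none => rfl
  | some v =>
    dsimp only
    cases PySem.List.pyGetD st.1.toList j none with
    | none => exact aset_eq st.1 j _ (by omega)
    | some w =>
      dsimp only
      split_ifs
      · exact aset_eq st.1 j _ (by omega)
      · rfl

theorem innerFold_sim (price : Int) (l : List Int) :
    ∀ (st : Array (Option Int) × Array (Option Int)), (∀ x ∈ l, 1 ≤ x) →
      ((l.foldl (stepJ price) st).1.toList, (l.foldl (stepJ price) st).2.toList)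
        = l.foldl (stepJL price) (st.1.toList, st.2.toList) := by
  induction l with
  | nil => intro st _; rfl
  | cons x t ih =>
    intro st hmem
    rw [List.foldl_cons, List.foldl_cons, ← stepJ_sim price st x (hmem x (by simp))]
    exact ih (stepJ price st x) (fun y hy => hmem y (by simp [hy]))

theorem stepPrice_sim (k price : Int) (st : Array (Option Int) × Array (Option Int)) :
    ((stepPrice k price st).1.toList, (stepPrice k price st).2.toList)
      = stepPriceL k price (st.1.toList, st.2.toList) := by
  unfold stepPrice stepPriceL
  dsimp only
  have hsim := innerFold_sim price ((PySem.List.pyRange 1 k 1).reverse) st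
    (by
      intro x hx
      rw [List.mem_reverse] at hx
      exact (PySem.List.mem_pyRange_one.mp hx).1)
  set rA := ((PySem.List.pyRange 1 k 1).reverse).foldl (stepJ price) st with hrA
  set rL := ((PySem.List.pyRange 1 k 1).reverse).foldl (stepJL price)
    (st.1.toList, st.2.toList) with hrL
  have h1 : rA.1.toList = rL.1 := by rw [← hsim]
  have h2 : rA.2.toList = rL.2 := by rw [← hsim]
  rw [aget_eq rA.1 0 (by omega), h1]
  have hd1 : (match PySem.List.pyGetD rL.1 0 none with
      | some v =>
        match aget rA.2 0 with
        | none => aset rA.2 0 (some (v + price))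
        | some w => if v + price > w then aset rA.2 0 (some (v + price)) else rA.2
      | none => rA.2).toList
      = (match PySem.List.pyGetD rL.1 0 none with
      | some v =>
        match PySem.List.pyGetD rL.2 0 none with
        | none => PySem.List.pySetD rL.2 0 (some (v + price))
        | some w => if v + price > w then PySem.List.pySetD rL.2 0 (some (v + price)) else rL.2
      | none => rL.2) := by
    rw [aget_eq rA.2 0 (by omega), h2]
    cases PySem.List.pyGetD rL.1 0 none with
    | none => exact h2
    | some v =>
      cases PySem.List.pyGetD rL.2 0 none with
      | none => rw [aset_eq rA.2 0 _ (by omega), h2]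
      | some w =>
        dsimp only
        split_ifs
        · rw [aset_eq rA.2 0 _ (by omega), h2]
        · exact h2
  rw [Prod.mk.injEq]
  refine ⟨?_, hd1⟩
  cases PySem.List.pyGetD rL.1 0 none with
  | none => rw [aset_eq rA.1 0 _ (by omega), h1]
  | some w =>
    dsimp only
    split_ifs
    · rw [aset_eq rA.1 0 _ (by omega), h1]
    · exact h1

theorem maxProfitk_eq_list (k : Int) (prices : List Int) :
    maxProfitk k prices = maxProfitkL k prices := by
  unfold maxProfitk maxProfitkL
  have hsim : ∀ (st : Array (Option Int) × Array (Option Int)),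
      ((prices.foldl (fun st price => stepPrice k price st) st).1.toList,
       (prices.foldl (fun st price => stepPrice k price st) st).2.toList)
        = prices.foldl (fun st price => stepPriceL k price st) (st.1.toList, st.2.toList) := by
    induction prices with
    | nil => intro st; rfl
    | cons p t ih =>
      intro st
      rw [List.foldl_cons, List.foldl_cons, ← stepPrice_sim k p st]
      exact ih (stepPrice k p st)
  set stA := prices.foldl (fun st price => stepPrice k price st)
    (Array.replicate k.toNat (none : Option Int), Array.replicate k.toNat (none : Option Int))
    with hstA
  set stL := prices.foldl (fun st price => stepPriceL k price st)
    (List.replicate k.toNat (none : Option Int), List.replicate k.toNat (none : Option Int))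
    with hstL
  have hfold := hsim (Array.replicate k.toNat (none : Option Int),
    Array.replicate k.toNat (none : Option Int))
  simp only [Array.toList_replicate] at hfold
  have h2 : stA.2.toList = stL.2 := by
    rw [hstA, hstL, ← hfold]
  apply PySem.List.foldl_congr_mem
  intro acc x hx
  have hx0 : 0 ≤ x := (PySem.List.mem_pyRange_one.mp hx).1
  rw [aget_eq stA.2 x hx0, h2]

-- Option-valued max (ties keep the left argument) and shift, the common DP algebra
def oshift (x : Option Int) (d : Int) : Option Int := x.map (· + d)

def obetter (a b : Option Int) : Option Int :=
  match a, b with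
  | none, b => b
  | some x, none => some x
  | some x, some y => if x ≥ y then some x else some y

-- one simultaneous price step of the mathematical DP on (buy, sell) indexed by transaction j
def mstep (p : Int) (f : Nat → Option Int × Option Int) : Nat → Option Int × Option Int :=
  fun j =>
    (obetter (f j).1 (oshift (if j = 0 then some 0 else (f (j - 1)).2) (-p)),
     obetter (f j).2 (oshift (f j).1 p))

def mdpFrom (f : Nat → Option Int × Option Int) (ps : List Int) : Nat → Option Int × Option Int :=
  ps.foldl (fun f p => mstep p f) f

def mdp0 : Nat → Option Int × Option Int := fun _ => (none, none)

def bmax (best : Int) (o : Option Int) : Int :=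
  match o with
  | some v => if v > best then v else best
  | none => best

-- stage-j sell values along all nonempty prefixes
def prefixSells : (Nat → Option Int × Option Int) → List Int → Nat → List (Option Int)
  | _, [], _ => []
  | f, p :: t, j => (mstep p f j).2 :: prefixSells (mstep p f) t j

-- A's per-price step in pure zipWith form (bridge between the two ports)
def altStep (p : Int) (st : List (Option Int) × List (Option Int)) :
    List (Option Int) × List (Option Int) :=
  let newSell := List.zipWith (fun s b => obetter s (oshift b p)) st.2 st.1
  let newBuy := List.zipWith (fun b ps => obetter b (oshift ps (-p))) st.1 (some 0 :: st.2.dropLast)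
  (newBuy, newSell)

theorem pyGetD_toNat {α : Type} (xs : List α) (j : Int) (h1 : 0 ≤ j) (d : α) :
    PySem.List.pyGetD xs j d = xs.getD j.toNat d := by
  have h : j = ((j.toNat : Nat) : Int) := by omega
  rw [h, PySem.List.pyGetD_natCast, List.getD_eq_getElem?_getD]
  have h2 : ((j.toNat : Int)).toNat = j.toNat := by omega
  rw [h2, List.getD_eq_getElem?_getD]

theorem getD_set_eq (l : List (Option Int)) (n i : Nat) (v : Option Int) :
    (l.set n v).getD i none = if i = n ∧ n < l.length then v else l.getD i none := by
  by_cases h1 : i = n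
  · subst h1
    by_cases h2 : i < l.length
    · rw [if_pos ⟨rfl, h2⟩, List.getD_eq_getElem _ _ (by simpa using h2), List.getElem_set,
        if_pos rfl]
    · rw [if_neg (fun hh => h2 hh.2), List.set_eq_of_length_le (by omega)]
  · rw [if_neg (fun hh => h1 hh.1)]
    by_cases h2 : i < l.length
    · rw [List.getD_eq_getElem _ _ (by simpa using h2), List.getElem_set,
        if_neg (fun hh => h1 hh.symm), List.getD_eq_getElem _ _ h2]
    · rw [List.getD_eq_default _ _ (by simp; omega), List.getD_eq_default _ _ (by omega)]

theorem obetter_none_right (a : Option Int) : obetter a none = a := by cases a <;> rfl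

theorem obetter_some_some (x y : Int) :
    obetter (some x) (some y) = if x ≥ y then some x else some y := rfl

theorem ext_getD {l1 l2 : List (Option Int)} (hlen : l1.length = l2.length)
    (h : ∀ i : Nat, i < l1.length → l1.getD i none = l2.getD i none) : l1 = l2 := by
  apply List.ext_getElem hlen
  intro i h1 h2
  have := h i h1
  rwa [List.getD_eq_getElem _ _ h1, List.getD_eq_getElem _ _ h2] at this

theorem getD_zipWith (f : Option Int → Option Int → Option Int) (l1 l2 : List (Option Int))
    (i : Nat) (h1 : i < l1.length) (h2 : i < l2.length) :
    (List.zipWith f l1 l2).getD i none = f (l1.getD i none) (l2.getD i none) := by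
  rw [List.getD_eq_getElem _ _ (by simp [List.length_zipWith]; omega), List.getElem_zipWith,
    List.getD_eq_getElem _ _ h1, List.getD_eq_getElem _ _ h2]

theorem getD_shift (l : List (Option Int)) (i : Nat) (hi : 1 ≤ i) (h : i < l.length) :
    ((some 0 : Option Int) :: l.dropLast).getD i none = l.getD (i - 1) none := by
  obtain ⟨i', rfl⟩ : ∃ i', i = i' + 1 := ⟨i - 1, by omega⟩
  rw [List.getD_eq_getElem _ _ (by simp [List.length_dropLast]; omega),
    List.getD_eq_getElem _ _ (by omega)]
  simp [List.getElem_dropLast]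

theorem updSell (price : Int) (b : Option Int) (d1 : List (Option Int)) (j : Int)
    (hj : 0 ≤ j) (hl : j.toNat < d1.length) :
    (match b with
     | some v =>
       match PySem.List.pyGetD d1 j none with
       | none => PySem.List.pySetD d1 j (some (v + price))
       | some w => if v + price > w then PySem.List.pySetD d1 j (some (v + price)) else d1
     | none => d1)
    = d1.set j.toNat (obetter (d1.getD j.toNat none) (oshift b price)) := by
  cases b with
  | none =>
    show d1 = _
    rw [show oshift none price = none from rfl, obetter_none_right,
      List.getD_eq_getElem _ _ hl, List.set_getElem_self hl]
  | some v =>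
    rw [show oshift (some v) price = some (v + price) from rfl]
    show (match PySem.List.pyGetD d1 j none with
      | none => PySem.List.pySetD d1 j (some (v + price))
      | some w => if v + price > w then PySem.List.pySetD d1 j (some (v + price)) else d1) = _
    rw [pyGetD_toNat d1 j hj none]
    cases hw : d1.getD j.toNat none with
    | none =>
      rw [PySem.List.pySetD_of_nonneg d1 _ hj]
      rfl
    | some w =>
      dsimp only
      by_cases hc : v + price > w
      · rw [if_pos hc, PySem.List.pySetD_of_nonneg d1 _ hj, obetter_some_some,
          if_neg (by omega)]
      · rw [if_neg hc, obetter_some_some, if_pos (by omega), ← hw,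
          List.getD_eq_getElem _ _ hl, List.set_getElem_self hl]

theorem updBuy (price : Int) (s : Option Int) (d0 : List (Option Int)) (j : Int)
    (hj : 0 ≤ j) (hl : j.toNat < d0.length) :
    (match s with
     | some v =>
       match PySem.List.pyGetD d0 j none with
       | none => PySem.List.pySetD d0 j (some (v - price))
       | some w => if v - price > w then PySem.List.pySetD d0 j (some (v - price)) else d0
     | none => d0)
    = d0.set j.toNat (obetter (d0.getD j.toNat none) (oshift s (-price))) := by
  cases s with
  | none =>
    show d0 = _
    rw [show oshift none (-price) = none from rfl, obetter_none_right,
      List.getD_eq_getElem _ _ hl, List.set_getElem_self hl]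
  | some v =>
    rw [show oshift (some v) (-price) = some (v - price) from by
      simp [oshift, sub_eq_add_neg]]
    show (match PySem.List.pyGetD d0 j none with
      | none => PySem.List.pySetD d0 j (some (v - price))
      | some w => if v - price > w then PySem.List.pySetD d0 j (some (v - price)) else d0) = _
    rw [pyGetD_toNat d0 j hj none]
    cases hw : d0.getD j.toNat none with
    | none =>
      rw [PySem.List.pySetD_of_nonneg d0 _ hj]
      rfl
    | some w =>
      dsimp only
      by_cases hc : v - price > w
      · rw [if_pos hc, PySem.List.pySetD_of_nonneg d0 _ hj, obetter_some_some,
          if_neg (by omega)]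
      · rw [if_neg hc, obetter_some_some, if_pos (by omega), ← hw,
          List.getD_eq_getElem _ _ hl, List.set_getElem_self hl]

theorem updBuy0 (price : Int) (d0 : List (Option Int)) (h : 0 < d0.length) :
    (match PySem.List.pyGetD d0 0 none with
     | none => PySem.List.pySetD d0 0 (some (-price))
     | some w => if -price > w then PySem.List.pySetD d0 0 (some (-price)) else d0)
    = d0.set 0 (obetter (d0.getD 0 none) (some (-price))) := by
  rw [PySem.List.pyGetD_zero]
  cases hw : d0.getD 0 none with
  | none =>
    rw [PySem.List.pySetD_of_nonneg d0 _ (by omega), Int.toNat_zero]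
    rfl
  | some w =>
    dsimp only
    by_cases hc : -price > w
    · rw [if_pos hc, PySem.List.pySetD_of_nonneg d0 _ (by omega), Int.toNat_zero,
        obetter_some_some, if_neg (by omega)]
    · rw [if_neg hc, obetter_some_some, if_pos (by omega), ← hw,
        List.getD_eq_getElem _ _ h, List.set_getElem_self h]

theorem stepJL_eq (price : Int) (st : List (Option Int) × List (Option Int)) (j : Int)
    (hj : 1 ≤ j) (h0 : j.toNat < st.1.length) (h1 : j.toNat < st.2.length) :
    stepJL price st j =
      (st.1.set j.toNat
        (obetter (st.1.getD j.toNat none) (oshift (st.2.getD (j.toNat - 1) none) (-price))),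
       st.2.set j.toNat
        (obetter (st.2.getD j.toNat none) (oshift (st.1.getD j.toNat none) price))) := by
  unfold stepJL
  dsimp only
  rw [updSell price (PySem.List.pyGetD st.1 j none) st.2 j (by omega) h1]
  have hread : ∀ v : Option Int, PySem.List.pyGetD (st.2.set j.toNat v) (j - 1) none =
      st.2.getD (j.toNat - 1) none := by
    intro v
    rw [pyGetD_toNat _ (j - 1) (by omega) none]
    have h2 : (j - 1).toNat = j.toNat - 1 := by omega
    rw [h2, getD_set_eq, if_neg (by omega)]
  rw [hread, updBuy price (st.2.getD (j.toNat - 1) none) st.1 j (by omega) h0]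
  rw [pyGetD_toNat st.1 j (by omega) none]

theorem innerFold (price k : Int) (K : Nat) (hkK : k ≤ (K : Int)) :
    ∀ (n : Nat) (m : Int), 1 ≤ m → (k - m).toNat = n →
    ∀ (st : List (Option Int) × List (Option Int)), st.1.length = K → st.2.length = K →
      (((PySem.List.pyRange m k 1).reverse).foldl (stepJL price) st).1.length = K ∧
      (((PySem.List.pyRange m k 1).reverse).foldl (stepJL price) st).2.length = K ∧
      (∀ i : Nat,
        (((PySem.List.pyRange m k 1).reverse).foldl (stepJL price) st).2.getD i none =
          if m ≤ (i : Int) ∧ (i : Int) < k then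
            obetter (st.2.getD i none) (oshift (st.1.getD i none) price)
          else st.2.getD i none) ∧
      (∀ i : Nat,
        (((PySem.List.pyRange m k 1).reverse).foldl (stepJL price) st).1.getD i none =
          if m ≤ (i : Int) ∧ (i : Int) < k then
            obetter (st.1.getD i none) (oshift (st.2.getD (i - 1) none) (-price))
          else st.1.getD i none) := by
  intro n
  induction n with
  | zero =>
    intro m hm hn st h0 h1
    have hkm : k ≤ m := by omega
    rw [PySem.List.pyRange_one_eq_nil hkm]
    simp only [List.reverse_nil, List.foldl_nil]
    refine ⟨h0, h1, ?_, ?_⟩ <;> intro i <;> rw [if_neg (by omega)]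
  | succ n ih =>
    intro m hm hn st h0 h1
    have hmk : m < k := by omega
    rw [PySem.List.pyRange_one_cons hmk, List.reverse_cons, List.foldl_append,
      List.foldl_cons, List.foldl_nil]
    obtain ⟨H0, H1, Hs, Hb⟩ := ih (m + 1) (by omega) (by omega) st h0 h1
    set r := ((PySem.List.pyRange (m + 1) k 1).reverse).foldl (stepJL price) st with hr
    have hmK : m.toNat < K := by omega
    rw [stepJL_eq price r m hm (by omega) (by omega)]
    refine ⟨by simp [H0], by simp [H1], ?_, ?_⟩
    · intro i
      dsimp only
      rw [getD_set_eq]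
      by_cases hi : i = m.toNat
      · subst hi
        rw [if_pos ⟨rfl, by omega⟩]
        simp only [Hs, Hb]
        split_ifs <;> first | rfl | omega
      · rw [if_neg (fun hh => hi hh.1)]
        simp only [Hs]
        split_ifs <;> first | rfl | omega
    · intro i
      dsimp only
      rw [getD_set_eq]
      by_cases hi : i = m.toNat
      · subst hi
        rw [if_pos ⟨rfl, by omega⟩]
        simp only [Hs, Hb]
        split_ifs <;> first | rfl | omega
      · rw [if_neg (fun hh => hi hh.1)]
        simp only [Hb]
        split_ifs <;> first | rfl | omega

theorem altStep_len (p : Int) (st : List (Option Int) × List (Option Int)) (K : Nat)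
    (hK : 1 ≤ K) (h0 : st.1.length = K) (h1 : st.2.length = K) :
    (altStep p st).1.length = K ∧ (altStep p st).2.length = K := by
  unfold altStep
  constructor
  · dsimp only
    rw [List.length_zipWith, List.length_cons, List.length_dropLast, h0, h1]
    omega
  · dsimp only
    rw [List.length_zipWith, h0, h1]
    omega

theorem stepPriceL_eq (k price : Int) (st : List (Option Int) × List (Option Int)) (K : Nat)
    (hK : 1 ≤ K) (hk : k = (K : Int)) (h0 : st.1.length = K) (h1 : st.2.length = K) :
    stepPriceL k price st = altStep price st := by
  obtain ⟨H0, H1, Hs, Hb⟩ := innerFold price k K (by omega) (k - 1).toNat 1 (by omega)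
    (by omega) st h0 h1
  unfold stepPriceL altStep
  dsimp only
  set r := ((PySem.List.pyRange 1 k 1).reverse).foldl (stepJL price) st with hr
  rw [updSell price (PySem.List.pyGetD r.1 0 none) r.2 0 (by omega) (by omega)]
  rw [updBuy0 price r.1 (by omega)]
  rw [PySem.List.pyGetD_zero]
  simp only [Int.toNat_zero]
  refine Prod.ext ?_ ?_
  · -- buy component
    dsimp only
    apply ext_getD
    · rw [List.length_set, List.length_zipWith, List.length_cons, List.length_dropLast,
        H0, h0, h1]
      omega
    · intro i hi
      have hiK : i < K := by rw [List.length_set, H0] at hi; exact hi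
      rw [getD_set_eq]
      rw [getD_zipWith _ _ _ i (by omega) (by simp [h1]; omega)]
      by_cases hzi : i = 0
      · subst hzi
        rw [if_pos ⟨rfl, by omega⟩, Hb 0, if_neg (by omega)]
        rw [show ((some 0 : Option Int) :: st.2.dropLast).getD 0 none = some 0 from rfl]
        rw [show oshift (some 0) (-price) = some (-price) from by simp [oshift]]
      · rw [if_neg (fun hh => hzi hh.1), Hb i, if_pos (by omega),
          getD_shift st.2 i (by omega) (by omega)]
  · -- sell component
    dsimp only
    apply ext_getD
    · rw [List.length_set, List.length_zipWith, H1, h0, h1]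
      omega
    · intro i hi
      have hiK : i < K := by rw [List.length_set, H1] at hi; exact hi
      rw [getD_set_eq]
      rw [getD_zipWith _ _ _ i (by omega) (by omega)]
      by_cases hzi : i = 0
      · subst hzi
        rw [if_pos ⟨rfl, by omega⟩, Hs 0, if_neg (by omega), Hb 0, if_neg (by omega)]
      · rw [if_neg (fun hh => hzi hh.1), Hs i, if_pos (by omega)]

theorem foldl_eq_alt (k : Int) (K : Nat) (hK : 1 ≤ K) (hk : k = (K : Int)) (prices : List Int) :
    ∀ st : List (Option Int) × List (Option Int), st.1.length = K → st.2.length = K →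
      prices.foldl (fun st price => stepPriceL k price st) st =
        prices.foldl (fun st p => altStep p st) st := by
  induction prices with
  | nil => intro st h0 h1; rfl
  | cons p rest ih =>
    intro st h0 h1
    simp only [List.foldl_cons]
    rw [stepPriceL_eq k p st K hK hk h0 h1]
    obtain ⟨l0, l1⟩ := altStep_len p st K hK h0 h1
    exact ih (altStep p st) l0 l1

theorem getD_replicate_of_lt {α : Type} (a d : α) (m i : Nat) (h : i < m) :
    (List.replicate m a).getD i d = a := by
  rw [List.getD_eq_getElem _ _ (by simpa using h), List.getElem_replicate]

-- the per-price zipWith step computes one mstep, pointwise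
theorem altStep_getD (p : Int) (st : List (Option Int) × List (Option Int)) (K : Nat)
    (h0 : st.1.length = K) (h1 : st.2.length = K) (j : Nat) (hj : j < K) :
    (altStep p st).2.getD j none = obetter (st.2.getD j none) (oshift (st.1.getD j none) p) ∧
    (altStep p st).1.getD j none =
      obetter (st.1.getD j none)
        (oshift (if j = 0 then some 0 else st.2.getD (j - 1) none) (-p)) := by
  unfold altStep
  dsimp only
  constructor
  · rw [getD_zipWith _ _ _ j (by omega) (by omega)]
  · rw [getD_zipWith _ _ _ j (by omega) (by simp [List.length_dropLast, h1]; omega)]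
    by_cases hz : j = 0
    · subst hz; rfl
    · rw [if_neg hz, getD_shift st.2 j (by omega) (by omega)]

theorem altfold_mdp (K : Nat) (ps : List Int) :
    ∀ (f : Nat → Option Int × Option Int) (st : List (Option Int) × List (Option Int)),
      st.1.length = K → st.2.length = K →
      (∀ j, j < K → st.1.getD j none = (f j).1 ∧ st.2.getD j none = (f j).2) →
      ((ps.foldl (fun st p => altStep p st) st).1.length = K ∧
       (ps.foldl (fun st p => altStep p st) st).2.length = K ∧
       ∀ j, j < K →
         (ps.foldl (fun st p => altStep p st) st).1.getD j none = (mdpFrom f ps j).1 ∧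
         (ps.foldl (fun st p => altStep p st) st).2.getD j none = (mdpFrom f ps j).2) := by
  induction ps with
  | nil =>
    intro f st h0 h1 hinv
    exact ⟨h0, h1, fun j hj => hinv j hj⟩
  | cons p t ih =>
    intro f st h0 h1 hinv
    simp only [List.foldl_cons]
    have hl0 : (altStep p st).1.length = K := by
      unfold altStep; dsimp only
      rw [List.length_zipWith, List.length_cons, List.length_dropLast, h0, h1]; omega
    have hl1 : (altStep p st).2.length = K := by
      unfold altStep; dsimp only
      rw [List.length_zipWith, h0, h1]; omega
    have hnew : ∀ j, j < K →
        (altStep p st).1.getD j none = (mstep p f j).1 ∧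
        (altStep p st).2.getD j none = (mstep p f j).2 := by
      intro j hj
      obtain ⟨hs, hb⟩ := altStep_getD p st K h0 h1 j hj
      obtain ⟨hfb, hfs⟩ := hinv j hj
      constructor
      · rw [hb, hfb]
        unfold mstep
        dsimp only
        by_cases hz : j = 0
        · subst hz; rfl
        · rw [if_neg hz, if_neg hz, (hinv (j - 1) (by omega)).2]
      · rw [hs, hfs, hfb]; rfl
    exact ih (mstep p f) (altStep p st) hl0 hl1 hnew

-- the Python if-chains of passStep are exactly the obetter/oshift algebra
theorem chain_sell (b s : Option Int) (p : Int) :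
    (match b with
     | some bv =>
       match s with
       | none => some (bv + p)
       | some sv => if bv + p > sv then some (bv + p) else s
     | none => s) = obetter s (oshift b p) := by
  cases b with
  | none => rw [show oshift none p = none from rfl, obetter_none_right]
  | some bv =>
    cases s with
    | none => rfl
    | some sv =>
      rw [show oshift (some bv) p = some (bv + p) from rfl, obetter_some_some]
      dsimp only
      split_ifs <;> first | rfl | omega

theorem chain_buy (q b : Option Int) (p : Int) :
    (match q with
     | some qv =>
       match b with
       | none => some (qv - p)
       | some bv => if qv - p > bv then some (qv - p) else b
     | none => b) = obetter b (oshift q (-p)) := by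
  cases q with
  | none => rw [show oshift none (-p) = none from rfl, obetter_none_right]
  | some qv =>
    rw [show oshift (some qv) (-p) = some (qv - p) from by simp [oshift, sub_eq_add_neg]]
    cases b with
    | none => rfl
    | some bv =>
      rw [obetter_some_some]
      dsimp only
      split_ifs <;> first | rfl | omega

theorem passStep_eq (b s : Option Int) (cur : List (Option Int)) (p : Int) (q : Option Int) :
    passStep (b, s, cur) (p, q) =
      (obetter b (oshift q (-p)), obetter s (oshift b p), cur ++ [obetter s (oshift b p)]) := by
  unfold passStep
  dsimp only
  rw [chain_sell b s p, chain_buy q b p]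

theorem length_prefixSells (ps : List Int) :
    ∀ (f : Nat → Option Int × Option Int) (j : Nat), (prefixSells f ps j).length = ps.length := by
  induction ps with
  | nil => intro f j; rfl
  | cons p t ih => intro f j; simp [prefixSells, ih]

theorem getD_prefixSells (ps : List Int) :
    ∀ (f : Nat → Option Int × Option Int) (j i : Nat), i < ps.length →
      (prefixSells f ps j).getD i none = (mdpFrom f (ps.take (i + 1)) j).2 := by
  induction ps with
  | nil => intro f j i hi; simp at hi
  | cons p t ih =>
    intro f j i hi
    cases i with
    | zero => rfl
    | succ i' =>
      rw [show prefixSells f (p :: t) j = (mstep p f j).2 :: prefixSells (mstep p f) t j from rfl,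
        List.getD_cons_succ, ih (mstep p f) j i' (by simpa using hi)]
      rfl

theorem pass_go (ps : List Int) :
    ∀ (qs : List (Option Int)) (f : Nat → Option Int × Option Int) (j : Nat)
      (cur : List (Option Int)),
      ps.length ≤ qs.length →
      (∀ i, i < ps.length →
        qs.getD i none = (if j = 0 then some 0 else (mdpFrom f (ps.take i) (j - 1)).2)) →
      (ps.zip qs).foldl passStep ((f j).1, (f j).2, cur)
        = ((mdpFrom f ps j).1, (mdpFrom f ps j).2, cur ++ prefixSells f ps j) := by
  induction ps with
  | nil =>
    intro qs f j cur _ _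
    simp [prefixSells, mdpFrom]
  | cons p t ih =>
    intro qs f j cur hlen hq
    cases qs with
    | nil => simp at hlen
    | cons q qs' =>
      rw [List.zip_cons_cons, List.foldl_cons, passStep_eq]
      have hq0 : q = (if j = 0 then some 0 else (f (j - 1)).2) := hq 0 (by simp)
      have hb : obetter (f j).1 (oshift q (-p)) = (mstep p f j).1 := by
        rw [hq0]; rfl
      have hs : obetter (f j).2 (oshift (f j).1 p) = (mstep p f j).2 := rfl
      rw [hb, hs]
      have hq' : ∀ i, i < t.length →
          qs'.getD i none = (if j = 0 then some 0 else (mdpFrom (mstep p f) (t.take i) (j - 1)).2) := by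
        intro i hi
        have := hq (i + 1) (by simpa using hi)
        rwa [List.getD_cons_succ, List.take_succ_cons] at this
      rw [ih qs' (mstep p f) j (cur ++ [(mstep p f j).2]) (by simpa using hlen) hq']
      rw [show mdpFrom f (p :: t) j = mdpFrom (mstep p f) t j from rfl]
      rw [show prefixSells f (p :: t) j = (mstep p f j).2 :: prefixSells (mstep p f) t j from rfl]
      simp

theorem stages (prices : List Int) (l : List Int) :
    ∀ (j : Nat) (best : Int) (prev : List (Option Int)),
      prev.length = prices.length + 1 →
      (∀ i, i < prices.length →
        prev.getD i none = (if j = 0 then some 0 else (mdpFrom mdp0 (prices.take i) (j - 1)).2)) →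
      (l.foldl (fun st _ => stageStep prices st) (best, prev)).1
        = (List.range' j l.length).foldl (fun b t => bmax b ((mdpFrom mdp0 prices t).2)) best := by
  induction l with
  | nil => intro j best prev _ _; rfl
  | cons x t ih =>
    intro j best prev hlen hq
    rw [List.foldl_cons, List.length_cons, List.range'_succ, List.foldl_cons]
    have hr : (prices.zip prev).foldl passStep (none, none, [none])
        = ((mdpFrom mdp0 prices j).1, (mdpFrom mdp0 prices j).2,
           [none] ++ prefixSells mdp0 prices j) :=
      pass_go prices prev mdp0 j [none] (by omega) hq
    have hstage : stageStep prices (best, prev)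
        = (bmax best ((mdpFrom mdp0 prices j).2), none :: prefixSells mdp0 prices j) := by
      unfold stageStep
      rw [hr]
      rfl
    rw [hstage]
    apply ih (j + 1) _ _
    · simp [length_prefixSells]
    · intro i hi
      cases i with
      | zero => rfl
      | succ i' =>
        rw [List.getD_cons_succ, getD_prefixSells prices mdp0 j i' (by omega)]
        simp

theorem replicate_getD_none (n : Nat) (i : Int) :
    PySem.List.pyGetD (List.replicate n (none : Option Int)) i none = none := by
  unfold PySem.List.pyGetD
  cases h : PySem.List.pyGet? (List.replicate n (none : Option Int)) i with
  | none => rfl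
  | some x =>
    have := PySem.List.mem_of_pyGet?_eq_some (List.replicate n none) h
    simp [List.eq_of_mem_replicate this]

theorem replicate_extract (k : Int) (n : Nat) :
    (PySem.List.pyRange 0 k 1).foldl (fun best i =>
      match PySem.List.pyGetD (List.replicate n (none : Option Int)) i none with
      | some v => if v > best then v else best
      | none => best) 0 = 0 := by
  have hcong : ∀ (acc : Int), ∀ x ∈ PySem.List.pyRange 0 k 1,
      (match PySem.List.pyGetD (List.replicate n (none : Option Int)) x none with
       | some v => if v > acc then v else acc
       | none => acc) = acc := by
    intro acc x _
    rw [replicate_getD_none n x]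
  rw [PySem.List.foldl_congr_mem _ _ (fun acc _ => acc) _ hcong]
  exact PySem.List.foldl_ignore _ _

-- ===== VERDICT (by name: the statement is the Claim_ definition above) =====
theorem maxProfitk_spec : Claim_equal_maxProfitk := by
  unfold Claim_equal_maxProfitk
  intro k prices hdom hpre
  unfold Spec_maxProfitk
  rw [maxProfitk_eq_list]
  unfold maxProfitkL maxProfitk_alt
  by_cases hp : prices = []
  · subst hp
    simp only [List.foldl_nil]
    rw [replicate_extract]
    simp
  · have hk1 : 1 ≤ k := by
      rcases hpre with h | h
      · exact h
      · exact absurd h hp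
    have hkK : k = (k.toNat : Int) := by omega
    have hK1 : 1 ≤ k.toNat := by omega
    set K := k.toNat with hKdef
    rw [if_neg (show ¬(k ≤ 0 ∨ prices = []) by
      intro hor
      rcases hor with h | h
      · omega
      · exact hp h)]
    -- A side: fold = altStep fold, whose sell row is the mdp values
    rw [foldl_eq_alt k K hK1 hkK prices
      (List.replicate K none, List.replicate K none) (by simp) (by simp)]
    obtain ⟨hL0, hL1, hval⟩ := altfold_mdp K prices mdp0
      (List.replicate K none, List.replicate K none) (by simp) (by simp)
      (by
        intro j hj
        constructor <;> simp [mdp0])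
    set stA := prices.foldl (fun st p => altStep p st)
      (List.replicate K (none : Option Int), List.replicate K (none : Option Int)) with hstA
    -- extraction over the pyRange, rewritten to a range-K fold of bmax over mdp sells
    have hA : (PySem.List.pyRange 0 k 1).foldl (fun best i =>
        match PySem.List.pyGetD stA.2 i none with
        | some v => if v > best then v else best
        | none => best) 0
        = (List.range K).foldl (fun b t => bmax b ((mdpFrom mdp0 prices t).2)) 0 := by
      rw [PySem.List.pyRange_one, List.foldl_map]
      have hKK : (k - 0).toNat = K := by omega
      rw [hKK]
      apply PySem.List.foldl_congr_mem
      intro acc t ht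
      have htK : t < K := by simpa using List.mem_range.mp ht
      have : PySem.List.pyGetD stA.2 (0 + (t : Int)) none = (mdpFrom mdp0 prices t).2 := by
        rw [zero_add, PySem.List.pyGetD_natCast, (hval t htK).2]
      rw [this]
      rfl
    rw [hA]
    -- B side: the staged fold computes the same range-K fold
    have hB := stages prices (PySem.List.pyRange 0 k 1) 0 0
      (List.replicate (prices.length + 1) (some 0 : Option Int))
      (by simp)
      (by
        intro i hi
        rw [getD_replicate_of_lt (some 0 : Option Int) (none : Option Int) _ i (by omega)]
        rfl)
    rw [hB, PySem.List.length_pyRange_one]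
    have : (k - 0).toNat = K := by omega
    rw [this, ← List.range_eq_range']
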